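-- pv_equiv track=rewrite | github.com/fullscreen-triangle/brut | demo/src/sleep/timing_and_efficiency.py | number_of_awakenings
-- ===== SOURCE A (Python) =====
-- from typing import Dict, List, Any, Optional
--
-- def number_of_awakenings(sleep_record: Dict[str, Any]) -> int:
--     """Calculate frequency of wake episodes from hypnogram"""
--     hypnogram = sleep_record.get('hypnogram_5min', '')
--     if not hypnogram:
--         return 0
--
--     awakenings = 0
--     in_wake = False
--
--     for stage in hypnogram:
--         if stage == 'A' and not in_wake:
--             # Start of wake episode
--             awakenings += 1
--             in_wake = True
--         elif stage != 'A' and in_wake: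
--             # End of wake episode
--             in_wake = False
--
--     return awakenings
-- ===== SOURCE B (Python) =====
-- def number_of_awakenings(sleep_record):
--     """Count wake episodes = whitespace-split tokens of the hypnogram masked to 'A's."""
--     hypnogram = sleep_record.get('hypnogram_5min', '')
--     mask = ''.join(c if c == 'A' else ' ' for c in hypnogram)
--     return len(mask.split())
-- ===== Notes on version B (the rewrite author's own statement) =====
-- stated objective: idiomatic
-- what changed: Replaces A's one-pass in_wake state machine by a staged pipeline: mask every non-'A' character to a space, whitespace-split the masked string into maximal 'A'-runs, and return the number of tokens; no per-character flag is maintained.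
import Mathlib
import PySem

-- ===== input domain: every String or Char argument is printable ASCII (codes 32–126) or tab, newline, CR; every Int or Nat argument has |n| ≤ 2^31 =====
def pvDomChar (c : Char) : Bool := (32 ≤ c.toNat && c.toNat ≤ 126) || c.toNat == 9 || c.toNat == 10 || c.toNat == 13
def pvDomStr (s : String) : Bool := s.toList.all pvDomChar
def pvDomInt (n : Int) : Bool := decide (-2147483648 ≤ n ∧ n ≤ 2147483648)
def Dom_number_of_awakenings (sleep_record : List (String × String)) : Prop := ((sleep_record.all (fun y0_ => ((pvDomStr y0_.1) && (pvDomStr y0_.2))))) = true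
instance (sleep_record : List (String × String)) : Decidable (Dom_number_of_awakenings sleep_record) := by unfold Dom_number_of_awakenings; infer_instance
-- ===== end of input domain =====

-- B replaces A's in_wake state-machine loop by a staged pipeline: mask non-'A' characters
-- to spaces, whitespace-split the mask into maximal 'A'-runs, count the tokens (idiomatic, same cost).

-- ===== PORT A =====
-- the body of A's for-loop (same state: (awakenings, in_wake))
def pvStepA (s : Int × Bool) (stage : Char) : Int × Bool :=
  if stage == 'A' && !s.2 then (s.1 + 1, true)
  else if stage != 'A' && s.2 then (s.1, false)
  else s

def number_of_awakenings (sleep_record : List (String × String)) : Int :=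
  let hypnogram := (sleep_record.lookup "hypnogram_5min").getD ""
  if hypnogram = "" then 0
  else (hypnogram.toList.foldl pvStepA (0, false)).1

-- ===== PORT B =====
def number_of_awakenings_alt (sleep_record : List (String × String)) : Int :=
  let hypnogram := (sleep_record.lookup "hypnogram_5min").getD ""
  let mask := String.ofList (hypnogram.toList.map (fun c => if c == 'A' then c else ' '))
  ((PySem.Str.split₀ mask).length : Int)

-- ===== PRECONDITION & SPEC =====
def Spec_number_of_awakenings (sleep_record : List (String × String)) (out : Int) : Prop := out = number_of_awakenings_alt sleep_record
instance (sleep_record : List (String × String)) (out : Int) : Decidable (Spec_number_of_awakenings sleep_record out) := by unfold Spec_number_of_awakenings; infer_instance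

-- ===== CLAIM (what is proved, stated in full; the proofs are below) =====
def Claim_equal_number_of_awakenings : Prop := ∀ (sleep_record : List (String × String)), Dom_number_of_awakenings sleep_record → Spec_number_of_awakenings sleep_record (number_of_awakenings sleep_record)

-- ===== LEMMAS AND PROOFS =====

-- Invariant tying A's fold state to split₀.go's accumulators: the wake flag is
-- "current token nonempty", and each finished token contributed one awakening.
theorem pv_main (l : List Char) : ∀ (n : Int) (cur : List Char) (acc : List (List Char)),
    (l.foldl pvStepA (n, !cur.isEmpty)).1 + (acc.length : Int) + (if cur.isEmpty then 0 else 1)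
      = n + ((PySem.Chars.split₀.go (l.map (fun c => if c == 'A' then c else ' ')) cur acc).length : Int) := by
  induction l with
  | nil =>
    intro n cur acc
    by_cases h : cur.isEmpty <;> simp [PySem.Chars.split₀.go, h] <;> omega
  | cons c t ih =>
    intro n cur acc
    by_cases hc : c = 'A'
    · have hm : (if c == 'A' then c else ' ') = 'A' := by simp [hc]
      have hsp : PySem.Chars.isspace 'A' = false := by decide
      have hstep : pvStepA (n, !cur.isEmpty) c
          = ((if cur.isEmpty then n + 1 else n), !((('A' : Char) :: cur).isEmpty)) := by
        by_cases h : cur.isEmpty <;> simp [pvStepA, hc, h]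
      rw [List.map_cons, hm, List.foldl_cons, hstep, PySem.Chars.split₀.go, hsp,
        if_neg Bool.false_ne_true]
      have iht := ih (if cur.isEmpty then n + 1 else n) ('A' :: cur) acc
      rw [show (if (('A' : Char) :: cur).isEmpty = true then (0 : Int) else 1) = 1 from rfl] at iht
      by_cases h : cur.isEmpty <;> simp only [h, Bool.false_eq_true, reduceIte] at iht ⊢ <;> omega
    · have hm : (if c == 'A' then c else ' ') = ' ' := by simp [hc]
      have hsp : PySem.Chars.isspace ' ' = true := by decide
      have hstep : pvStepA (n, !cur.isEmpty) c = (n, !(([] : List Char).isEmpty)) := by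
        by_cases h : cur.isEmpty <;> simp [pvStepA, hc, h]
      rw [List.map_cons, hm, List.foldl_cons, hstep, PySem.Chars.split₀.go, hsp, if_pos rfl]
      by_cases h : cur.isEmpty
      · have iht := ih n [] acc
        rw [show (if ([] : List Char).isEmpty = true then (0 : Int) else 1) = 0 from rfl] at iht
        simp only [h, Bool.false_eq_true, reduceIte]
        omega
      · have iht := ih n [] (cur.reverse :: acc)
        rw [show (if ([] : List Char).isEmpty = true then (0 : Int) else 1) = 0 from rfl] at iht
        simp only [List.length_cons] at iht
        simp only [h, Bool.false_eq_true, reduceIte]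
        omega

-- ===== VERDICT (by name: the statement is the Claim_ definition above) =====
theorem number_of_awakenings_spec : Claim_equal_number_of_awakenings := by
  intro sr _
  unfold Spec_number_of_awakenings number_of_awakenings number_of_awakenings_alt
  by_cases h : (sr.lookup "hypnogram_5min").getD "" = ""
  · simp [h, PySem.Str.split₀, PySem.Chars.split₀, PySem.Chars.split₀.go]
  · simp only [h, if_false, PySem.Str.split₀, List.length_map]
    have htl : (String.ofList ((((sr.lookup "hypnogram_5min").getD "").toList).map (fun c => if c == 'A' then c else ' '))).toList
        = (((sr.lookup "hypnogram_5min").getD "").toList).map (fun c => if c == 'A' then c else ' ') := by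
      simp
    rw [htl, PySem.Chars.split₀]
    have := pv_main ((sr.lookup "hypnogram_5min").getD "").toList 0 [] []
    simp only [show (!([] : List Char).isEmpty) = false from rfl,
      show (if ([] : List Char).isEmpty then (0 : Int) else 1) = 0 from rfl,
      List.length_nil] at this
    omega
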